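-- pv_equiv track=rewrite | github.com/sn4B/covid-19-pandemic-simulation | initiator/core.py | build_individual_adult_map
-- ===== SOURCE A (Python) =====
-- def build_individual_adult_map(individual_house_map_arg):
--     all_ind_adu = {0: 1}  # We track who is adult to further affect a work
--     incr_ind = 1
--     i_ind = 1
--     while i_ind < len(individual_house_map_arg):
--         if individual_house_map_arg[i_ind] != individual_house_map_arg[i_ind-1]:  # We have a new house
--             incr_ind = 0
--         # First two persons in a house are adults since children cannot live alone
--         # Could be extended to monoparental families but anyway ...
--         if incr_ind < 2:
--             all_ind_adu[i_ind] = 1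
--         else:
--             all_ind_adu[i_ind] = 0
--         incr_ind = incr_ind + 1
--         i_ind = i_ind + 1
--     return all_ind_adu
-- ===== SOURCE B (Python) =====
-- def build_individual_adult_map(individual_house_map_arg):
--     # Stage 1: run-length encode consecutive runs of equal house ids.
--     runs = []
--     for x in individual_house_map_arg:
--         if runs and runs[-1][0] == x:
--             runs[-1][1] += 1
--         else:
--             runs.append([x, 1])
--     # Stage 2: within each run, the first two members are adults.
--     flags = [1 if local < 2 else 0 for _, cnt in runs for local in range(cnt)]
--     # Stage 3: assemble the dict; index 0 is pre-marked adult (also for empty input).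
--     result = {0: 1}
--     for i, f in enumerate(flags):
--         result[i] = f
--     return result
-- ===== Notes on version B (the rewrite author's own statement) =====
-- stated objective: alternative
-- what changed: Replaces A's single stateful while-loop (run-position counter reset on each new house) by three staged passes: run-length encoding of consecutive equal house ids, a flat comprehension marking the first two positions of each run, and a final dict assembly from the flag list.
import Mathlib
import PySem

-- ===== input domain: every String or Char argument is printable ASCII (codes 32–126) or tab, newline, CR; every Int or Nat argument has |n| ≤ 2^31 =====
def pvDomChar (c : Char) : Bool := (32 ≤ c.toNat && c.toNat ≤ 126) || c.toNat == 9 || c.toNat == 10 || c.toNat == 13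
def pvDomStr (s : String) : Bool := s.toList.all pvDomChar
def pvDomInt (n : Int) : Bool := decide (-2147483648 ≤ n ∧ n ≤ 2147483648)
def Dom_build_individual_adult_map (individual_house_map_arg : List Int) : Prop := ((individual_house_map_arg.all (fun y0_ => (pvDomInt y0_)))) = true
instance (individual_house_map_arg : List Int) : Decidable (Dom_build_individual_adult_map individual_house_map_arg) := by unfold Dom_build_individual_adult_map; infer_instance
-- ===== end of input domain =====

-- B replaces A's single stateful while-loop (a run-position counter reset on each new house) by three
-- staged passes: run-length encoding of consecutive equal house ids, a flat list of adult flags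
-- (first two positions of each run), and a final dict assembly (alternative decomposition, same O(n) cost).

-- ===== PORT A =====
-- A's while-loop body: state = (incr_ind, dict); the loop counter i_ind runs over range(1, len).
def pvStepA (xs : List Int) (st : Int × PySem.Dict Int Int) (i : Int) : Int × PySem.Dict Int Int :=
  let incr := if PySem.List.pyGetD xs i 0 ≠ PySem.List.pyGetD xs (i - 1) 0 then (0 : Int) else st.1
  (incr + 1, st.2.insert i (if incr < 2 then 1 else 0))

def build_individual_adult_map (individual_house_map_arg : List Int) : List (Int × Int) :=
  ((PySem.List.pyRange 1 individual_house_map_arg.length 1).foldl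
      (pvStepA individual_house_map_arg)
      (1, PySem.Dict.ofList [(0, 1)])).2.items

-- ===== PORT B =====
-- Stage-1 loop body: run-length encoding (`counts[-1][1] += 1` or `counts.append([x, 1])`).
def pvRunStep (runs : List (Int × Int)) (x : Int) : List (Int × Int) :=
  match runs.getLast? with
  | some last => if last.1 = x then runs.dropLast ++ [(last.1, last.2 + 1)] else runs ++ [(x, 1)]
  | none => runs ++ [(x, 1)]

def build_individual_adult_map_alt (individual_house_map_arg : List Int) : List (Int × Int) :=
  let runs := individual_house_map_arg.foldl pvRunStep []
  let flags := runs.flatMap (fun r =>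
    (PySem.List.pyRange 0 r.2 1).map (fun localIdx => if localIdx < 2 then (1 : Int) else 0))
  ((PySem.List.enumerate flags 0).foldl (fun d p => d.insert p.1 p.2)
      (PySem.Dict.ofList [(0, 1)])).items

-- ===== PRECONDITION & SPEC =====
def Spec_build_individual_adult_map (individual_house_map_arg : List Int) (out : List (Int × Int)) : Prop := out = build_individual_adult_map_alt individual_house_map_arg
instance (individual_house_map_arg : List Int) (out : List (Int × Int)) : Decidable (Spec_build_individual_adult_map individual_house_map_arg out) := by unfold Spec_build_individual_adult_map; infer_instance

-- ===== CLAIM (what is proved, stated in full; the proofs are below) =====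
def Claim_equal_build_individual_adult_map : Prop := ∀ (individual_house_map_arg : List Int), Dom_build_individual_adult_map individual_house_map_arg → Spec_build_individual_adult_map individual_house_map_arg (build_individual_adult_map individual_house_map_arg)

-- ===== LEMMAS AND PROOFS =====

-- (key, flag) pairs produced by A's counter loop over a list of indices.
def pairsA (xs : List Int) : Int → List Int → List (Int × Int)
  | _, [] => []
  | incr, i :: is =>
    let incr' := if PySem.List.pyGetD xs i 0 ≠ PySem.List.pyGetD xs (i - 1) 0 then (0 : Int) else incr
    (i, if incr' < 2 then 1 else 0) :: pairsA xs (incr' + 1) is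

-- structural version of A's flag stream: state = (run position so far, previous house id).
def svFlags : Int → Int → List Int → List Int
  | _, _, [] => []
  | incr, prev, x :: t =>
    let incr' := if x ≠ prev then (0 : Int) else incr
    (if incr' < 2 then (1 : Int) else 0) :: svFlags (incr' + 1) x t

-- structural version of B's stage-1 fold: current run (h, c) plus the remaining input.
def extendRuns : Int → Int → List Int → List (Int × Int)
  | h, c, [] => [(h, c)]
  | h, c, x :: t => if x = h then extendRuns h (c + 1) t else (h, c) :: extendRuns x 1 t

lemma foldl_pvRunStep (t : List Int) : ∀ (acc : List (Int × Int)) (h c : Int),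
    t.foldl pvRunStep (acc ++ [(h, c)]) = acc ++ extendRuns h c t := by
  induction t with
  | nil => intro acc h c; simp [extendRuns]
  | cons x t ih =>
    intro acc h c
    simp only [List.foldl_cons, extendRuns]
    by_cases hx : x = h
    · have : pvRunStep (acc ++ [(h, c)]) x = acc ++ [(h, c + 1)] := by
        simp [pvRunStep, hx]
      rw [this, ih, if_pos hx]
    · have : pvRunStep (acc ++ [(h, c)]) x = (acc ++ [(h, c)]) ++ [(x, 1)] := by
        have : ¬ ((h, c) : Int × Int).1 = x := fun hh => hx hh.symm
        simp [pvRunStep, this]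
      rw [this, ih, if_neg hx]
      simp

lemma flags_extendRuns (t : List Int) : ∀ (h c : Int), 0 ≤ c →
    (extendRuns h c t).flatMap (fun r =>
        (PySem.List.pyRange 0 r.2 1).map (fun localIdx => if localIdx < 2 then (1 : Int) else 0))
      = (PySem.List.pyRange 0 c 1).map (fun localIdx => if localIdx < 2 then (1 : Int) else 0)
        ++ svFlags c h t := by
  induction t with
  | nil => intro h c _; simp [extendRuns, svFlags]
  | cons x t ih =>
    intro h c hc
    by_cases hx : x = h
    · subst hx
      have hrange : PySem.List.pyRange 0 (c + 1) 1
          = PySem.List.pyRange 0 c 1 ++ [c] := PySem.List.pyRange_one_succ_right hc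
      simp only [extendRuns, svFlags, ne_eq, not_true_eq_false, if_false, if_true]
      rw [ih x (c + 1) (by omega), hrange]
      simp
    · simp only [extendRuns, if_neg hx, svFlags, List.flatMap_cons]
      rw [ih x 1 (by omega)]
      have h1 : PySem.List.pyRange 0 1 1 = [0] := PySem.List.pyRange_one_singleton 0
      simp [hx, h1]

lemma itemsA (xs : List Int) (is : List Int) : ∀ (incr : Int) (d : PySem.Dict Int Int),
    (∀ j ∈ is, d.contains j = false) → is.Nodup →
    ((is.foldl (pvStepA xs) (incr, d)).2).items = d.items ++ pairsA xs incr is := by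
  induction is with
  | nil => intro incr d _ _; simp [pairsA]
  | cons i is ih =>
    intro incr d hfresh hnd
    simp only [List.foldl_cons, pairsA, pvStepA]
    have hdi : d.contains i = false := hfresh i (by simp)
    have hni : i ∉ is := (List.nodup_cons.mp hnd).1
    rw [ih _ _ (by
        intro j hj
        rw [PySem.Dict.contains_insert]
        have : j ≠ i := fun h => hni (h ▸ hj)
        simp [this, hfresh j (List.mem_cons_of_mem _ hj)])
      (List.nodup_cons.mp hnd).2]
    rw [PySem.Dict.items_insert_of_not_contains _ _ hdi]
    simp

lemma alignA (xs : List Int) (t : List Int) : ∀ (i : Nat) (incr : Int), 1 ≤ i → xs.drop i = t →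
    pairsA xs incr (PySem.List.pyRange (i : Int) (xs.length : Int) 1)
      = PySem.List.enumerate (svFlags incr (xs.getD (i - 1) 0) t) (i : Int) := by
  induction t with
  | nil =>
    intro i incr hi hdrop
    have hlen : xs.length ≤ i := by
      by_contra h
      have := List.drop_eq_nil_iff.mp hdrop
      omega
    rw [PySem.List.pyRange_one_eq_nil (by exact_mod_cast hlen)]
    simp [pairsA, svFlags]
  | cons x t ih =>
    intro i incr hi hdrop
    have hilt : i < xs.length := by
      by_contra h
      rw [List.drop_eq_nil_iff.mpr (by omega)] at hdrop
      simp at hdrop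
    have hxi : xs.getD i 0 = x := by
      have h0 : (xs.drop i)[0]? = some x := by rw [hdrop]; rfl
      rw [List.getElem?_drop] at h0
      have h0' : xs[i]? = some x := by simpa using h0
      simp [List.getD_eq_getElem?_getD, h0']
    have hget : PySem.List.pyGetD xs (i : Int) 0 = x := by
      rw [PySem.List.pyGetD_natCast]; exact hxi
    have hget' : PySem.List.pyGetD xs ((i : Int) - 1) 0 = xs.getD (i - 1) 0 := by
      have : (i : Int) - 1 = ((i - 1 : Nat) : Int) := by omega
      rw [this, PySem.List.pyGetD_natCast]
    have hdrop' : xs.drop (i + 1) = t := by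
      have : xs.drop (i + 1) = (xs.drop i).drop 1 := by
        rw [List.drop_drop]
      rw [this, hdrop]; rfl
    rw [PySem.List.pyRange_one_cons (by exact_mod_cast hilt)]
    simp only [pairsA, svFlags, hget, hget']
    by_cases hne : x ≠ xs.getD (i - 1) 0
    · simp only [if_pos hne, PySem.List.enumerate_cons]
      have := ih (i + 1) (0 + 1) (by omega) hdrop'
      rw [show ((i : Int) + 1) = ((i + 1 : Nat) : Int) by push_cast; ring]
      rw [this]
      have hxi' : xs[i]?.getD 0 = x := by simpa [List.getD_eq_getElem?_getD] using hxi
      simp [hxi']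
    · simp only [if_neg hne, PySem.List.enumerate_cons]
      have := ih (i + 1) (incr + 1) (by omega) hdrop'
      rw [show ((i : Int) + 1) = ((i + 1 : Nat) : Int) by push_cast; ring]
      rw [this]
      have hxi' : xs[i]?.getD 0 = x := by simpa [List.getD_eq_getElem?_getD] using hxi
      simp [hxi']

-- ===== VERDICT (by name: the statement is the Claim_ definition above) =====
theorem build_individual_adult_map_spec : Claim_equal_build_individual_adult_map := by
  intro xs _
  unfold Spec_build_individual_adult_map
  cases xs with
  | nil => decide
  | cons x0 rest =>
    unfold build_individual_adult_map build_individual_adult_map_alt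
    -- A side
    have hA : ((PySem.List.pyRange 1 (x0 :: rest).length 1).foldl (pvStepA (x0 :: rest))
        (1, PySem.Dict.ofList [(0, 1)])).2.items
        = [((0 : Int), (1 : Int))] ++ pairsA (x0 :: rest) 1 (PySem.List.pyRange 1 (x0 :: rest).length 1) := by
      apply itemsA
      · intro j hj
        have hj1 : 1 ≤ j := (PySem.List.mem_pyRange_one.mp hj).1
        have hne : j ≠ 0 := by omega
        have hk : (PySem.Dict.ofList [((0 : Int), (1 : Int))]).keys = [0] := by decide
        simp [PySem.Dict.contains_eq_decide_mem_keys, hk, hne]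
      · exact PySem.List.nodup_pyRange_one _ _
    -- B side: stage 1
    have hRuns : (x0 :: rest).foldl pvRunStep [] = extendRuns x0 1 rest := by
      have h0 : pvRunStep [] x0 = [] ++ [(x0, 1)] := by simp [pvRunStep]
      simp only [List.foldl_cons, h0]
      exact foldl_pvRunStep rest [] x0 1
    -- B side: stage 2
    have hFlags : (extendRuns x0 1 rest).flatMap (fun r =>
        (PySem.List.pyRange 0 r.2 1).map (fun localIdx => if localIdx < 2 then (1 : Int) else 0))
        = 1 :: svFlags 1 x0 rest := by
      have h1 : PySem.List.pyRange 0 1 1 = [0] := by decide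
      rw [flags_extendRuns rest x0 1 (by omega), h1]
      simp
    -- B side: stage 3
    have hB : ∀ (l : List Int),
        ((PySem.List.enumerate (1 :: l) 0).foldl (fun d p => d.insert p.1 p.2)
            (PySem.Dict.ofList [((0 : Int), (1 : Int))])).items
          = [((0 : Int), (1 : Int))] ++ PySem.List.enumerate l 1 := by
      intro l
      rw [PySem.List.enumerate_cons]
      simp only [List.foldl_cons]
      have hins : (PySem.Dict.ofList [((0 : Int), (1 : Int))]).insert 0 1
          = PySem.Dict.ofList [((0 : Int), (1 : Int))] := by decide
      rw [hins]
      have := PySem.Dict.items_foldl_insert_fresh (l := PySem.List.enumerate l 1)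
        (k := Prod.fst) (v := Prod.snd) (d := PySem.Dict.ofList [((0 : Int), (1 : Int))])
        (by
          intro a ha
          obtain ⟨k, hk, hak⟩ := (PySem.List.mem_enumerate_iff _ _ _).mp ha
          have : a.1 = 1 + (k : Int) := by rw [hak]
          have hne : a.1 ≠ 0 := by omega
          have hky : (PySem.Dict.ofList [((0 : Int), (1 : Int))]).keys = [0] := by decide
          simp [PySem.Dict.contains_eq_decide_mem_keys, hky, hne])
        (by rw [PySem.List.map_fst_enumerate]; exact PySem.List.nodup_pyRange_one _ _)
      simpa using this
    simp only [hRuns, hFlags]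
    rw [hA, hB (svFlags 1 x0 rest)]
    have halign := alignA (x0 :: rest) rest 1 1 (by omega) (by rfl)
    simp only [Nat.cast_one] at halign
    rw [halign]
    rfl
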